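-- pv_equiv track=rewrite | github.com/tanishqtrivedi27/CS-213 | python/ssl-1.py | f01_IED
-- ===== SOURCE A (Python) =====
-- def f01_IED(num):
--     mylist = []
--     while(num):
--         mylist.append(num%10)
--         num = int(num/10)
--
--     mylist = [(x+1)%10 for x in mylist]
--     num=0
--     for i in range(0, len(mylist)):
--         num = num+(mylist[i]*(10**i))
--
--     return num
-- ===== SOURCE B (Python) =====
-- def f01_IED(num):
--     result = 0
--     place = 1
--     while num:
--         result += ((num % 10 + 1) % 10) * place
--         place *= 10
--         num = int(num / 10)
--     return result
-- ===== Notes on version B (the rewrite author's own statement) =====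
-- stated objective: simpler
-- what changed: Fuses A's two passes (build a digit list, then reconstruct with mylist[i]*10**i) into a single while-loop that accumulates the result directly with a running place multiplier, building no intermediate list.
import Mathlib
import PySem

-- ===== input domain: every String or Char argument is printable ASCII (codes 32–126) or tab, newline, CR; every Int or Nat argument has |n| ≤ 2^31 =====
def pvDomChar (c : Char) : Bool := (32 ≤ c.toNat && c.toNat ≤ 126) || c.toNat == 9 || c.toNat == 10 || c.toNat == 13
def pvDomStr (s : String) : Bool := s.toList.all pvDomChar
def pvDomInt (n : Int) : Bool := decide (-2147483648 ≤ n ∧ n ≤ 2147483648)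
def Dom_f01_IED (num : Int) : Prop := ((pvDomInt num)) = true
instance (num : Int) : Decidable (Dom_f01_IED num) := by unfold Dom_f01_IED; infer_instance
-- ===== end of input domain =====

-- B fuses A's two passes (build digit list, then reconstruct with 10**i) into one
-- accumulator loop with a running place value; objective: simpler, no intermediate list.
-- Note on 'int(num/10)': for |num| ≤ 2^31 the float division is exact enough that
-- int(num/10) = truncation toward zero, ported exactly as Int.tdiv.

-- ===== PORT A =====
-- the while-loop building mylist; terminates since |num.tdiv 10| < |num| for num ≠ 0
def f01_IED_loopA (num : Int) : List Int :=
  if num = 0 then []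
  else PySem.Int.mod num 10 :: f01_IED_loopA (num.tdiv 10)
termination_by num.natAbs
decreasing_by
  have h2 : (num.tdiv 10).natAbs = num.natAbs / 10 := Int.natAbs_tdiv num 10
  omega

def f01_IED (num : Int) : Int :=
  let mylist := f01_IED_loopA num
  let mylist := mylist.map (fun x => PySem.Int.mod (x + 1) 10)
  -- 'for i in range(0, len(mylist)): num = num + mylist[i]*(10**i)';
  -- 10**i ported as 10 ^ i.toNat (i ranges over the nonnegative pyRange indices, exact there)
  (PySem.List.pyRange 0 (mylist.length : Int) 1).foldl
    (fun acc i => acc + PySem.List.pyGetD mylist i 0 * 10 ^ i.toNat) 0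

-- ===== PORT B =====
def f01_IED_loopB (num result place : Int) : Int :=
  if num = 0 then result
  else f01_IED_loopB (num.tdiv 10)
        (result + PySem.Int.mod (PySem.Int.mod num 10 + 1) 10 * place) (place * 10)
termination_by num.natAbs
decreasing_by
  have h2 : (num.tdiv 10).natAbs = num.natAbs / 10 := Int.natAbs_tdiv num 10
  omega

def f01_IED_alt (num : Int) : Int := f01_IED_loopB num 0 1

-- ===== PRECONDITION & SPEC =====
def Spec_f01_IED (num : Int) (out : Int) : Prop := out = f01_IED_alt num
instance (num : Int) (out : Int) : Decidable (Spec_f01_IED num out) := by unfold Spec_f01_IED; infer_instance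

-- ===== CLAIM (what is proved, stated in full; the proofs are below) =====
def Claim_equal_f01_IED : Prop := ∀ (num : Int), Dom_f01_IED num → Spec_f01_IED num (f01_IED num)

-- ===== LEMMAS AND PROOFS =====

-- proof-side reconstruction: Σ l[k] * 10^k * p
def pvRecon : List Int → Int → Int
  | [], _ => 0
  | d :: t, p => d * p + pvRecon t (p * 10)

theorem pvRecon_mul (l : List Int) : ∀ p : Int, pvRecon l p = pvRecon l 1 * p := by
  induction l with
  | nil => intro p; simp [pvRecon]
  | cons d t ih => intro p; simp [pvRecon, ih (p * 10), ih 10]; ring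

theorem pvSum_eq_recon (l : List Int) :
    ((List.range l.length).map (fun k => l.getD k 0 * 10 ^ k)).sum = pvRecon l 1 := by
  induction l with
  | nil => simp [pvRecon]
  | cons d t ih =>
      rw [List.length_cons, List.range_succ_eq_map]
      simp only [List.map_cons, List.map_map, List.sum_cons]
      have : ((List.range t.length).map
          ((fun k => (d :: t).getD k 0 * 10 ^ k) ∘ Nat.succ)).sum
          = ((List.range t.length).map (fun k => t.getD k 0 * 10 ^ k * 10)).sum := by
        congr 1
        apply List.map_congr_left
        intro k _
        simp [Function.comp, List.getD, pow_succ]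
        ring
      rw [this, List.sum_map_mul_right, ih]
      simp [pvRecon, pvRecon_mul t 10]

theorem pvA_eq_recon (num : Int) :
    f01_IED num = pvRecon ((f01_IED_loopA num).map (fun x => PySem.Int.mod (x + 1) 10)) 1 := by
  unfold f01_IED
  dsimp only
  set l := (f01_IED_loopA num).map (fun x => PySem.Int.mod (x + 1) 10) with hl
  rw [PySem.List.pyRange_one]
  simp only [sub_zero, Int.toNat_natCast, List.foldl_map]
  rw [PySem.List.foldl_add (g := fun k : Nat => PySem.List.pyGetD l (0 + (k : Int)) 0 * 10 ^ (0 + (k : Int)).toNat)]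
  simp only [zero_add, PySem.List.pyGetD_natCast, Int.toNat_natCast]
  rw [pvSum_eq_recon]

theorem pvB_eq_recon (num : Int) : ∀ r p : Int,
    f01_IED_loopB num r p
      = r + pvRecon ((f01_IED_loopA num).map (fun x => PySem.Int.mod (x + 1) 10)) p := by
  induction num using f01_IED_loopA.induct with
  | case1 =>
      intro r p
      rw [f01_IED_loopB, f01_IED_loopA]
      simp [pvRecon]
  | case2 num h ih =>
      intro r p
      rw [f01_IED_loopB, f01_IED_loopA, if_neg h, if_neg h]
      simp only [List.map_cons, pvRecon]
      rw [ih]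
      ring

-- ===== VERDICT (by name: the statement is the Claim_ definition above) =====
theorem f01_IED_spec : Claim_equal_f01_IED := by
  intro num _
  unfold Spec_f01_IED f01_IED_alt
  rw [pvA_eq_recon, pvB_eq_recon]
  ring
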